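-- pv_equiv track=rewrite | github.com/MikhailMostWanted/ASTRA_TG | services/digest_builder.py | _canonicalize_text
-- ===== SOURCE A (Python) =====
-- def _canonicalize_text(text: str) -> str:
--     normalized = []
--     previous_space = False
--     for symbol in text.casefold():
--         if symbol.isalnum():
--             normalized.append(symbol)
--             previous_space = False
--             continue
--         if symbol.isspace() and not previous_space:
--             normalized.append(" ")
--             previous_space = True
--     return "".join(normalized).strip()
-- ===== SOURCE B (Python) =====
-- def _canonicalize_text(text: str) -> str:
--     cleaned = [''.join(c for c in tok if c.isalnum()) for tok in text.casefold().split()]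
--     return ' '.join(w for w in cleaned if w)
-- ===== Notes on version B (the rewrite author's own statement) =====
-- stated objective: simpler
-- what changed: Replaces A's single-pass character loop with a previous_space flag and final strip by a split()-then-filter decomposition: casefold, whitespace-split (which collapses runs and strips ends), keep only alnum chars per token, drop empty tokens, join with single spaces.
import Mathlib
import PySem

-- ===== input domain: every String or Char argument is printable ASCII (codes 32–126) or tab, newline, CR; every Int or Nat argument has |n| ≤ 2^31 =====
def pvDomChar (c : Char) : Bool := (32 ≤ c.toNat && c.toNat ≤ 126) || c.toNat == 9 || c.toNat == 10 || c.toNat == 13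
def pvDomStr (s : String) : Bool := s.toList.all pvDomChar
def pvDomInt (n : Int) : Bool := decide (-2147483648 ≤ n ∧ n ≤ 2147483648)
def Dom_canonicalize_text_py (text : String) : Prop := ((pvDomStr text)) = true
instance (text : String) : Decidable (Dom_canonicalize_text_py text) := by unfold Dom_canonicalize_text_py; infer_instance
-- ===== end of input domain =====

-- B replaces A's one-pass character loop with a previous_space flag by a split()-then-filter
-- decomposition (casefold, whitespace-split, keep alnum chars per token, drop empty tokens,
-- join with single spaces); objective: simpler. (.casefold() is ported as PySem.Chars.lower,
-- which coincides with casefold on the ASCII domain Dom_.)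

-- ===== PORT A =====
-- the loop body: append alnum chars; on whitespace append one ' ' unless one was just appended
def canonAStep (st : List Char × Bool) (c : Char) : List Char × Bool :=
  if PySem.Chars.isalnum c then (st.1 ++ [c], false)
  else if PySem.Chars.isspace c && !st.2 then (st.1 ++ [' '], true)
  else st

def canonicalize_text_py (text : String) : String :=
  let st := (PySem.Chars.lower text.toList).foldl canonAStep ([], false)
  String.mk (PySem.Chars.strip st.1)

-- ===== PORT B =====
-- ''.join(c for c in tok if c.isalnum())
def cleanWord (tok : List Char) : List Char := tok.filter PySem.Chars.isalnum

def canonicalize_text_py_alt (text : String) : String :=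
  let cleaned := (PySem.Chars.split₀ (PySem.Chars.lower text.toList)).map cleanWord
  String.mk (PySem.Chars.join [' '] (cleaned.filter (fun w => !w.isEmpty)))

-- ===== PRECONDITION & SPEC =====
def Spec_canonicalize_text_py (text : String) (out : String) : Prop := out = canonicalize_text_py_alt text
instance (text : String) (out : String) : Decidable (Spec_canonicalize_text_py text out) := by unfold Spec_canonicalize_text_py; infer_instance

-- ===== CLAIM (what is proved, stated in full; the proofs are below) =====
def Claim_equal_canonicalize_text_py : Prop := ∀ (text : String), Dom_canonicalize_text_py text → Spec_canonicalize_text_py text (canonicalize_text_py text)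

-- ===== LEMMAS AND PROOFS =====

-- A's loop, accumulator-free: the characters A appends while scanning cs with flag prev
def gA : List Char → Bool → List Char
  | [], _ => []
  | c :: r, prev =>
    if PySem.Chars.isalnum c then c :: gA r false
    else if PySem.Chars.isspace c && !prev then ' ' :: gA r true
    else gA r prev

-- B's core on char lists
def wB (cs : List Char) : List Char :=
  PySem.Chars.join [' '] (((PySem.Chars.split₀ cs).map cleanWord).filter (fun w => !w.isEmpty))

theorem foldA_eq (cs : List Char) : ∀ acc prev,
    (cs.foldl canonAStep (acc, prev)).1 = acc ++ gA cs prev := by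
  induction cs with
  | nil => intro acc prev; simp [gA]
  | cons c r ih =>
    intro acc prev
    by_cases h1 : PySem.Chars.isalnum c = true
    · simp [canonAStep, gA, h1, ih]
    · by_cases h2 : (PySem.Chars.isspace c && !prev) = true
      · simp [canonAStep, gA, h1, h2, ih]
      · simp [canonAStep, gA, h1, h2, ih]

theorem isalnum_not_space (c : Char) (h : PySem.Chars.isalnum c = true) :
    PySem.Chars.isspace c = false := by
  simp [PySem.Chars.isalnum, PySem.Chars.isalpha, PySem.Chars.isdigit,
    PySem.Chars.isupper, PySem.Chars.islower, Char.le_def, UInt32.le_iff_toNat_le] at h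
  simp [PySem.Chars.isspace]
  omega

-- split₀.go equations
theorem split₀go_nil (cur : List Char) (acc : List (List Char)) :
    PySem.Chars.split₀.go [] cur acc =
      (if cur.isEmpty then acc.reverse else (cur.reverse :: acc).reverse) := by
  simp [PySem.Chars.split₀.go]

theorem split₀go_space {c : Char} (h : PySem.Chars.isspace c = true)
    (rest cur : List Char) (acc : List (List Char)) :
    PySem.Chars.split₀.go (c :: rest) cur acc =
      (if cur.isEmpty then PySem.Chars.split₀.go rest [] acc
       else PySem.Chars.split₀.go rest [] (cur.reverse :: acc)) := by
  simp [PySem.Chars.split₀.go, h]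

theorem split₀go_char {c : Char} (h : PySem.Chars.isspace c = false)
    (rest cur : List Char) (acc : List (List Char)) :
    PySem.Chars.split₀.go (c :: rest) cur acc =
      PySem.Chars.split₀.go rest (c :: cur) acc := by
  simp [PySem.Chars.split₀.go, h]

theorem split₀go_acc (cs : List Char) : ∀ cur acc,
    PySem.Chars.split₀.go cs cur acc = acc.reverse ++ PySem.Chars.split₀.go cs cur [] := by
  induction cs with
  | nil => intro cur acc; by_cases h : cur.isEmpty <;> simp [split₀go_nil, h]
  | cons c r ih =>
    intro cur acc
    by_cases h : PySem.Chars.isspace c = true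
    · by_cases h2 : cur.isEmpty
      · simp only [split₀go_space h, h2, if_true]; exact ih [] acc
      · simp only [split₀go_space h, h2, if_false, Bool.false_eq_true]
        rw [ih [] (cur.reverse :: acc), ih [] [cur.reverse]]
        simp
    · simp only [Bool.not_eq_true] at h
      rw [split₀go_char h, split₀go_char h, ih]

theorem split₀_nil : PySem.Chars.split₀ [] = [] := by
  simp [PySem.Chars.split₀, split₀go_nil]

theorem split₀_space {c : Char} (h : PySem.Chars.isspace c = true) (r : List Char) :
    PySem.Chars.split₀ (c :: r) = PySem.Chars.split₀ r := by
  simp [PySem.Chars.split₀, split₀go_space h]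

theorem split₀go_word (r : List Char) : ∀ cur, cur ≠ [] →
    PySem.Chars.split₀.go r cur [] =
      (cur.reverse ++ r.takeWhile (fun c => !PySem.Chars.isspace c)) ::
        PySem.Chars.split₀ (r.dropWhile (fun c => !PySem.Chars.isspace c)) := by
  induction r with
  | nil =>
    intro cur hcur
    simp [split₀go_nil, List.isEmpty_iff, hcur, split₀_nil]
  | cons c t ih =>
    intro cur hcur
    by_cases h : PySem.Chars.isspace c = true
    · rw [split₀go_space h]
      simp only [List.isEmpty_iff, hcur, if_neg hcur, List.takeWhile_cons, List.dropWhile_cons, h,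
        Bool.not_true, if_false, Bool.false_eq_true, List.append_nil]
      rw [split₀go_acc, split₀_space h]
      simp [PySem.Chars.split₀]
    · simp only [Bool.not_eq_true] at h
      rw [split₀go_char h, ih (c :: cur) (by simp)]
      simp [List.takeWhile_cons, List.dropWhile_cons, h]
  
theorem split₀_char {c : Char} (h : PySem.Chars.isspace c = false) (r : List Char) :
    PySem.Chars.split₀ (c :: r) =
      (c :: r.takeWhile (fun c => !PySem.Chars.isspace c)) ::
        PySem.Chars.split₀ (r.dropWhile (fun c => !PySem.Chars.isspace c)) := by
  show PySem.Chars.split₀.go (c :: r) [] [] = _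
  rw [split₀go_char h, split₀go_word _ [c] (by simp)]
  simp

theorem cleanWord_no_space (w : List Char) : ∀ c ∈ cleanWord w, PySem.Chars.isspace c = false := by
  intro c hc
  simp [cleanWord] at hc
  exact isalnum_not_space c hc.2

-- rstrip lemmas
theorem rstrip_eq_nil_iff (s : List Char) :
    PySem.Chars.rstrip s = [] ↔ ∀ c ∈ s, PySem.Chars.isspace c = true := by
  simp [PySem.Chars.rstrip, List.dropWhile_eq_nil_iff]

theorem rstrip_append (x y : List Char) :
    PySem.Chars.rstrip (x ++ y) =
      (if PySem.Chars.rstrip y = [] then PySem.Chars.rstrip x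
       else x ++ PySem.Chars.rstrip y) := by
  simp only [PySem.Chars.rstrip, List.reverse_append, List.dropWhile_append]
  by_cases h : (List.dropWhile PySem.Chars.isspace y.reverse).isEmpty
  · have h' : List.dropWhile PySem.Chars.isspace y.reverse = [] := List.isEmpty_iff.mp h
    simp [h, h']
  · have h' : List.dropWhile PySem.Chars.isspace y.reverse ≠ [] := by
      simpa [List.isEmpty_iff] using h
    simp [h, h']

theorem rstrip_of_no_space (x : List Char) (h : ∀ c ∈ x, PySem.Chars.isspace c = false) :
    PySem.Chars.rstrip x = x := by
  have : List.dropWhile PySem.Chars.isspace x.reverse = x.reverse := by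
    cases hx : x.reverse with
    | nil => simp
    | cons a t =>
      have ha : a ∈ x := by
        have : a ∈ x.reverse := by simp [hx]
        simpa using this
      simp [List.dropWhile_cons, h a ha]
  simp [PySem.Chars.rstrip, this]

-- heads of gA · true are never spaces
theorem gA_true_head (cs : List Char) :
    gA cs true = [] ∨ ∃ h t, gA cs true = h :: t ∧ PySem.Chars.isspace h = false := by
  induction cs with
  | nil => left; simp [gA]
  | cons c r ih =>
    by_cases h1 : PySem.Chars.isalnum c = true
    · right; exact ⟨c, gA r false, by simp [gA, h1], isalnum_not_space c h1⟩
    · simpa [gA, h1] using ih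

theorem gA_true_rstrip_nil (cs : List Char) (h : PySem.Chars.rstrip (gA cs true) = []) :
    gA cs true = [] := by
  rcases gA_true_head cs with h0 | ⟨c, t, he, hns⟩
  · exact h0
  · rw [rstrip_eq_nil_iff] at h
    have := h c (by simp [he])
    rw [this] at hns; cases hns

theorem lstrip_gA_true (cs : List Char) :
    List.dropWhile PySem.Chars.isspace (gA cs true) = gA cs true := by
  rcases gA_true_head cs with h0 | ⟨c, t, he, hns⟩
  · simp [h0]
  · simp [he, List.dropWhile_cons, hns]

-- processing a whitespace-free word from flag false: punctuation is dropped, flag stays false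
theorem gA_word_false (w : List Char) (hw : ∀ c ∈ w, PySem.Chars.isspace c = false) :
    ∀ rest, gA (w ++ rest) false = cleanWord w ++ gA rest false := by
  induction w with
  | nil => intro rest; simp [cleanWord]
  | cons c w' ih =>
    intro rest
    have hc : PySem.Chars.isspace c = false := hw c (by simp)
    have hw' : ∀ x ∈ w', PySem.Chars.isspace x = false := fun x hx => hw x (by simp [hx])
    by_cases h1 : PySem.Chars.isalnum c = true
    · simp [gA, h1, cleanWord, List.filter_cons, ih hw']
    · have : cleanWord (c :: w') = cleanWord w' := by simp [cleanWord, List.filter_cons, h1]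
      simp only [List.cons_append, gA, h1, if_false, Bool.false_eq_true, hc, Bool.false_and, this]
      exact ih hw' rest

-- processing a whitespace-free word from flag true
theorem gA_word_true (w : List Char) (hw : ∀ c ∈ w, PySem.Chars.isspace c = false) :
    ∀ rest, gA (w ++ rest) true =
      cleanWord w ++ (if cleanWord w = [] then gA rest true else gA rest false) := by
  induction w with
  | nil => intro rest; simp [cleanWord]
  | cons c w' ih =>
    intro rest
    have hc : PySem.Chars.isspace c = false := hw c (by simp)
    have hw' : ∀ x ∈ w', PySem.Chars.isspace x = false := fun x hx => hw x (by simp [hx])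
    by_cases h1 : PySem.Chars.isalnum c = true
    · have hcw : cleanWord (c :: w') = c :: cleanWord w' := by
        simp [cleanWord, List.filter_cons, h1]
      simp [gA, h1, hcw, gA_word_false w' hw' rest]
    · have hcw : cleanWord (c :: w') = cleanWord w' := by simp [cleanWord, List.filter_cons, h1]
      simp only [List.cons_append, gA, h1, if_false, Bool.false_eq_true, hc, Bool.false_and, hcw]
      exact ih hw' rest

-- unfolding wB
theorem wB_nil : wB [] = [] := by simp [wB, split₀_nil, PySem.Chars.join_nil]

theorem wB_space {c : Char} (h : PySem.Chars.isspace c = true) (r : List Char) :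
    wB (c :: r) = wB r := by simp [wB, split₀_space h]

theorem join_words_ne_nil (L : List (List Char)) (hL : ∀ w ∈ L, w ≠ []) :
    PySem.Chars.join [' '] L = [] ↔ L = [] := by
  cases L with
  | nil => simp [PySem.Chars.join_nil]
  | cons a L' =>
    constructor
    · intro h
      exfalso
      cases L' with
      | nil =>
        rw [PySem.Chars.join_singleton] at h
        exact hL a (by simp) h
      | cons b t =>
        rw [PySem.Chars.join_cons_cons] at h
        simp at h
    · intro h; cases h

theorem join_cons (a : List Char) (L : List (List Char)) (hL : L ≠ []) :
    PySem.Chars.join [' '] (a :: L) = a ++ ' ' :: PySem.Chars.join [' '] L := by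
  cases L with
  | nil => cases hL rfl
  | cons b t => rw [PySem.Chars.join_cons_cons]; simp

-- the central lemma: A's scan from flag true, right-stripped, equals B's joined words
theorem main_true : ∀ n (cs : List Char), cs.length ≤ n →
    PySem.Chars.rstrip (gA cs true) = wB cs := by
  intro n
  induction n with
  | zero =>
    intro cs h
    have : cs = [] := List.eq_nil_of_length_eq_zero (Nat.le_zero.mp h)
    subst this
    simp [gA, wB_nil, PySem.Chars.rstrip]
  | succ n ih =>
    intro cs hlen
    cases cs with
    | nil => simp [gA, wB_nil, PySem.Chars.rstrip]
    | cons c r =>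
      by_cases hsp : PySem.Chars.isspace c = true
      · have h1 : PySem.Chars.isalnum c = false := by
          by_contra h
          simp only [Bool.not_eq_false] at h
          rw [isalnum_not_space c h] at hsp; cases hsp
        have hgs : gA (c :: r) true = gA r true := by simp [gA, h1, hsp]
        rw [hgs, wB_space hsp]
        exact ih r (by simp at hlen; omega)
      · simp only [Bool.not_eq_true] at hsp
        have hsplit := split₀_char hsp r
        set P : Char → Bool := fun c => !PySem.Chars.isspace c with hP
        set w : List Char := c :: r.takeWhile P with hw
        set rest : List Char := r.dropWhile P with hrest
        have hwns : ∀ x ∈ w, PySem.Chars.isspace x = false := by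
          intro x hx
          rw [hw] at hx
          rcases List.mem_cons.mp hx with h | h
          · rw [h]; exact hsp
          · have := List.mem_takeWhile_imp h
            simpa [hP] using this
        have hgA : gA (c :: r) true =
            cleanWord w ++ (if cleanWord w = [] then gA rest true else gA rest false) := by
          have hdecomp : c :: r = w ++ rest := by
            rw [hw, hrest]; simp [List.takeWhile_append_dropWhile]
          rw [hdecomp]
          exact gA_word_true w hwns rest
        have hrestlen : rest.length ≤ n := by
          have h1 : rest.length ≤ r.length := by rw [hrest]; exact List.length_dropWhile_le _ _
          simp at hlen; omega
        have hwB : wB (c :: r) =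
            PySem.Chars.join [' ']
              ((cleanWord w :: ((PySem.Chars.split₀ rest).map cleanWord)).filter
                (fun w => !w.isEmpty)) := by
          simp [wB, hsplit]
        by_cases hcw : cleanWord w = []
        · -- the token cleans to nothing: both sides reduce to the rest
          rw [hgA, hwB]
          simp only [hcw, if_true, List.nil_append, List.filter_cons, List.isEmpty_nil,
            Bool.not_true, Bool.false_eq_true, if_false]
          have : PySem.Chars.join [' ']
              (((PySem.Chars.split₀ rest).map cleanWord).filter (fun w => !w.isEmpty)) = wB rest := rfl
          rw [this]
          exact ih rest hrestlen
        · rw [hgA, hwB]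
          simp only [hcw, if_false]
          have hfil : (cleanWord w :: ((PySem.Chars.split₀ rest).map cleanWord)).filter
              (fun w => !w.isEmpty) =
              cleanWord w :: (((PySem.Chars.split₀ rest).map cleanWord).filter (fun w => !w.isEmpty)) := by
            simp [List.filter_cons, List.isEmpty_iff, hcw]
          rw [hfil]
          set L := ((PySem.Chars.split₀ rest).map cleanWord).filter (fun w => !w.isEmpty) with hL
          have hLne : ∀ v ∈ L, v ≠ [] := by
            intro v hv
            rw [hL] at hv
            have := List.of_mem_filter hv
            simpa [List.isEmpty_iff] using this
          cases hre : rest with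
          | nil =>
            have hLnil : L = [] := by rw [hL, hre, split₀_nil]; rfl
            simp only [gA]
            rw [List.append_nil, rstrip_of_no_space _ (cleanWord_no_space w), hLnil,
              PySem.Chars.join_singleton]
          | cons s r₂ =>
            have hs : PySem.Chars.isspace s = true := by
              have := List.head_dropWhile_not P (l := r)
              rw [← hrest, hre] at this
              simpa [hP] using this (by simp)
            have hgr : gA (s :: r₂) false = ' ' :: gA r₂ true := by
              have h1 : PySem.Chars.isalnum s = false := by
                by_contra hh
                simp only [Bool.not_eq_false] at hh
                rw [isalnum_not_space s hh] at hs; cases hs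
              simp [gA, h1, hs]
            have hr₂len : r₂.length ≤ n := by
              rw [hre] at hrestlen; simp at hrestlen; omega
            have ihr₂ := ih r₂ hr₂len
            have hjoin2 : PySem.Chars.join [' '] L = wB r₂ := by
              rw [hL, hre, split₀_space hs]; rfl
            rw [hgr]
            have hsplitapp : cleanWord w ++ ' ' :: gA r₂ true =
                cleanWord w ++ ([' '] ++ gA r₂ true) := by simp
            rw [hsplitapp, rstrip_append]
            by_cases hz : wB r₂ = []
            · have hga2 : gA r₂ true = [] := gA_true_rstrip_nil r₂ (by rw [ihr₂, hz])
              have hLnil : L = [] := by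
                have : PySem.Chars.join [' '] L = [] := by rw [hjoin2, hz]
                exact (join_words_ne_nil L hLne).mp this
              rw [hga2]
              have hsp1 : PySem.Chars.rstrip ([' '] ++ ([] : List Char)) = [] := by decide
              rw [if_pos hsp1, rstrip_of_no_space _ (cleanWord_no_space w), hLnil,
                PySem.Chars.join_singleton]
            · have hrs : PySem.Chars.rstrip ([' '] ++ gA r₂ true) = ' ' :: wB r₂ := by
                rw [rstrip_append]
                rw [if_neg (by rw [ihr₂]; exact hz), ihr₂]
                simp
              rw [if_neg (by rw [hrs]; simp), hrs]
              have hLne' : L ≠ [] := by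
                intro hh
                exact hz (by rw [← hjoin2, hh, PySem.Chars.join_nil])
              rw [join_cons _ _ hLne', hjoin2]

-- leading spaces: dropping them from a flag-false scan gives the flag-true scan
theorem lstrip_gA_false (cs : List Char) :
    List.dropWhile PySem.Chars.isspace (gA cs false) = gA cs true := by
  induction cs with
  | nil => simp [gA]
  | cons c r ih =>
    by_cases h1 : PySem.Chars.isalnum c = true
    · simp [gA, h1, List.dropWhile_cons, isalnum_not_space c h1]
    · by_cases h2 : PySem.Chars.isspace c = true
      · have h1' : PySem.Chars.isalnum c = false := by simpa using h1
        have hsp' : PySem.Chars.isspace ' ' = true := by decide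
        simp [gA, h1', h2, List.dropWhile_cons, hsp', lstrip_gA_true]
      · simp only [Bool.not_eq_true] at h2
        simp [gA, h1, h2, ih]

-- ===== VERDICT (by name: the statement is the Claim_ definition above) =====
theorem canonicalize_text_py_spec : Claim_equal_canonicalize_text_py := by
  intro text _
  unfold Spec_canonicalize_text_py canonicalize_text_py canonicalize_text_py_alt
  set cs := PySem.Chars.lower text.toList with hcs
  have h1 : ((cs.foldl canonAStep ([], false)).1) = gA cs false := by
    simpa using foldA_eq cs [] false
  have h2 : PySem.Chars.strip (gA cs false) = wB cs := by
    rw [PySem.Chars.strip, PySem.Chars.lstrip, lstrip_gA_false, main_true cs.length cs le_rfl]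
  simp only [h1, h2]
  rfl
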